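-- pv_equiv track=rewrite | github.com/Rectrix-21/KeyTone | apps/api/app/services/variations.py | _nearest_scale_note
-- ===== SOURCE A (Python) =====
-- SCALE_NOTES = {
--     "major": [0, 2, 4, 5, 7, 9, 11],
--     "minor": [0, 2, 3, 5, 7, 8, 10],
-- }
--
-- def _clamp(value: float, low: float, high: float) -> float:
--     return max(low, min(high, value))
--
-- def _in_scale(note: int, root: int, mode: str) -> bool:
--     allowed = {(root + interval) % 12 for interval in SCALE_NOTES.get(mode, SCALE_NOTES["major"])}
--     return note % 12 in allowed
--
-- def _nearest_scale_note(note: int, root: int, mode: str) -> int: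
--     clipped = int(_clamp(float(note), 0, 127))
--     if _in_scale(clipped, root, mode):
--         return clipped
--     for distance in range(1, 12):
--         for candidate in (clipped + distance, clipped - distance):
--             if 0 <= candidate <= 127 and _in_scale(candidate, root, mode):
--                 return candidate
--     return clipped
-- ===== SOURCE B (Python) =====
-- SCALE_NOTES = {
--     "major": [0, 2, 4, 5, 7, 9, 11],
--     "minor": [0, 2, 3, 5, 7, 8, 10],
-- }
--
-- def _nearest_scale_note(note: int, root: int, mode: str) -> int:
--     clipped = int(max(0.0, min(127.0, float(note))))
--     allowed = {(root + i) % 12 for i in SCALE_NOTES.get(mode, SCALE_NOTES["major"])}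
--     candidates = [m for m in range(128) if m % 12 in allowed]
--     return min(candidates, key=lambda m: (abs(m - clipped), -m))
-- ===== Notes on version B (the rewrite author's own statement) =====
-- stated objective: alternative
-- what changed: A's outward expanding search (distance 1..11, +d before -d, calling _in_scale per candidate) is replaced by computing the allowed pitch-class set once, listing all in-scale MIDI notes in range(128), and selecting the nearest with min over the tuple key (abs(m - clipped), -m), whose -m component reproduces A's prefer-higher tie-break.
import Mathlib
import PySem

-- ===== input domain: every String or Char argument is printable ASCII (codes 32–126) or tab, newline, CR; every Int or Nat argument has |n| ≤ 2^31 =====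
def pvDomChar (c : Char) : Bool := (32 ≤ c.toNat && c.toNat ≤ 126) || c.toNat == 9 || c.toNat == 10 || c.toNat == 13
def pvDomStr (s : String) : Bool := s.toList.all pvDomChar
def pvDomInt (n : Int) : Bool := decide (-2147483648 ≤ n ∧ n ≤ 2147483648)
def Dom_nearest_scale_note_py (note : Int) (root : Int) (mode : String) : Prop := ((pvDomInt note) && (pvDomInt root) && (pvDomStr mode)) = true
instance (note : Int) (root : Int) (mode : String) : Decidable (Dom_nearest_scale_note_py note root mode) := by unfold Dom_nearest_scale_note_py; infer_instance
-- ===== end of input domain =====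

-- B replaces A's outward expanding search by one selection pass over the 128-note table with a tuple key (alternative decomposition, not claimed faster).

-- ===== PORT A =====
-- SCALE_NOTES, a module constant (shared data literal for both ports)
def pvScaleNotes : PySem.Dict String (List Int) :=
  PySem.Dict.ofList [("major", [0, 2, 4, 5, 7, 9, 11]), ("minor", [0, 2, 3, 5, 7, 8, 10])]

-- _in_scale(note, root, mode)
def pvInScale (note : Int) (root : Int) (mode : String) : Bool :=
  let allowed : PySem.Set Int :=
    PySem.Set.ofList ((pvScaleNotes.getD mode [0, 2, 4, 5, 7, 9, 11]).map
      (fun interval => PySem.Int.mod (root + interval) 12))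
  PySem.Set.contains allowed (PySem.Int.mod note 12)

-- the nested 'for distance in range(1, 12): for candidate in (clipped+distance, clipped-distance)' loops
def pvSearch (clipped : Int) (root : Int) (mode : String) : List Int → Int
  | [] => clipped
  | distance :: rest =>
    if 0 ≤ clipped + distance ∧ clipped + distance ≤ 127 ∧ pvInScale (clipped + distance) root mode then
      clipped + distance
    else if 0 ≤ clipped - distance ∧ clipped - distance ≤ 127 ∧ pvInScale (clipped - distance) root mode then
      clipped - distance
    else pvSearch clipped root mode rest

-- int(_clamp(float(note), 0, 127)) = max 0 (min 127 note): exact on Dom (|note| ≤ 2^31, so float(note) is exact)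
def nearest_scale_note_py (note : Int) (root : Int) (mode : String) : Int :=
  let clipped : Int := max 0 (min 127 note)
  if pvInScale clipped root mode then clipped
  else pvSearch clipped root mode (PySem.List.pyRange 1 12 1)

-- ===== PORT B =====
def nearest_scale_note_py_alt (note : Int) (root : Int) (mode : String) : Int :=
  let clipped : Int := max 0 (min 127 note)
  let allowed : PySem.Set Int :=
    PySem.Set.ofList ((pvScaleNotes.getD mode [0, 2, 4, 5, 7, 9, 11]).map
      (fun i => PySem.Int.mod (root + i) 12))
  let candidates : List Int :=
    (PySem.List.pyRange 0 128 1).filter (fun m => PySem.Set.contains allowed (PySem.Int.mod m 12))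
  -- min(candidates, key=lambda m: (abs(m - clipped), -m)); candidates is never empty, so .getD is only a totality guard
  (PySem.List.min2? candidates (fun m => |m - clipped|) (fun m => -m)).getD clipped

-- ===== PRECONDITION & SPEC =====
def Spec_nearest_scale_note_py (note : Int) (root : Int) (mode : String) (out : Int) : Prop := out = nearest_scale_note_py_alt note root mode
instance (note : Int) (root : Int) (mode : String) (out : Int) : Decidable (Spec_nearest_scale_note_py note root mode out) := by unfold Spec_nearest_scale_note_py; infer_instance

-- ===== CLAIM (what is proved, stated in full; the proofs are below) =====
def Claim_equal_nearest_scale_note_py : Prop := ∀ (note : Int) (root : Int) (mode : String), Dom_nearest_scale_note_py note root mode → Spec_nearest_scale_note_py note root mode (nearest_scale_note_py note root mode)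

-- ===== LEMMAS AND PROOFS =====

-- proof-only normalised forms: mode collapsed to a Bool, root taken mod 12, the Set/Dict machinery unfolded
def pvAllowed (r : Int) (minor : Bool) : List Int :=
  (if minor then [0, 2, 3, 5, 7, 8, 10] else [0, 2, 4, 5, 7, 9, 11]).map
    (fun i => PySem.Int.mod (r + i) 12)

def pvInScaleB (n r : Int) (minor : Bool) : Bool := (pvAllowed r minor).contains (PySem.Int.mod n 12)

def pvSearchB (c r : Int) (minor : Bool) : List Int → Int
  | [] => c
  | d :: rest =>
    if 0 ≤ c + d ∧ c + d ≤ 127 ∧ pvInScaleB (c + d) r minor then c + d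
    else if 0 ≤ c - d ∧ c - d ≤ 127 ∧ pvInScaleB (c - d) r minor then c - d
    else pvSearchB c r minor rest

def pvFA (c r : Int) (minor : Bool) : Int :=
  if pvInScaleB c r minor then c else pvSearchB c r minor (PySem.List.pyRange 1 12 1)

def pvGB (c : Int) (L : List Int) : Int :=
  (PySem.List.min2? L (fun m => |m - c|) (fun m => -m)).getD c

-- the dict lookup depends on mode only through whether mode = "minor"
lemma pvScale_getD (mode : String) :
    pvScaleNotes.getD mode [0, 2, 4, 5, 7, 9, 11] =
      if mode = "minor" then [0, 2, 3, 5, 7, 8, 10] else [0, 2, 4, 5, 7, 9, 11] := by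
  by_cases h : mode = "minor"
  · subst h; rfl
  · by_cases h2 : mode = "major"
    · subst h2; rfl
    · have e1 : ("major" == mode) = false := beq_eq_false_iff_ne.mpr (Ne.symm h2)
      have e2 : ("minor" == mode) = false := beq_eq_false_iff_ne.mpr (Ne.symm h)
      simp [pvScaleNotes, PySem.Dict.getD, PySem.Dict.get?, PySem.Dict.ofList,
        PySem.Dict.update, PySem.Dict.empty, PySem.Dict.insert, List.find?, h, e1, e2]

-- (root + i) % 12 depends on root only through root % 12
lemma pvMod_root (root : Int) :
    (fun i => PySem.Int.mod (root + i) 12) =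
      (fun i => PySem.Int.mod (PySem.Int.mod root 12 + i) 12) := by
  funext i; simp [Int.emod_add_emod]

lemma pvContains_ofList (l : List Int) (x : Int) :
    PySem.Set.contains (PySem.Set.ofList l) x = l.contains x := by
  simp [PySem.Set.mem_ofList]

lemma pvInScale_glue (n root : Int) (mode : String) :
    pvInScale n root mode = pvInScaleB n (PySem.Int.mod root 12) (mode == "minor") := by
  unfold pvInScale pvInScaleB pvAllowed
  rw [pvScale_getD, pvMod_root root, pvContains_ofList]
  by_cases h : mode = "minor" <;> simp [h]

lemma pvSearch_glue (c root : Int) (mode : String) (ds : List Int) :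
    pvSearch c root mode ds = pvSearchB c (PySem.Int.mod root 12) (mode == "minor") ds := by
  induction ds with
  | nil => rfl
  | cons d rest ih => simp only [pvSearch, pvSearchB, pvInScale_glue, ih]

lemma pvA_glue (note root : Int) (mode : String) :
    nearest_scale_note_py note root mode =
      pvFA (max 0 (min 127 note)) (PySem.Int.mod root 12) (mode == "minor") := by
  unfold nearest_scale_note_py pvFA
  simp only [pvInScale_glue, pvSearch_glue]

lemma pvB_glue (note root : Int) (mode : String) :
    nearest_scale_note_py_alt note root mode =
      pvGB (max 0 (min 127 note))
        ((PySem.List.pyRange 0 128 1).filter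
          (fun m => pvInScaleB m (PySem.Int.mod root 12) (mode == "minor"))) := by
  unfold nearest_scale_note_py_alt pvGB pvInScaleB pvAllowed
  rw [pvScale_getD, pvMod_root root]
  simp only [pvContains_ofList]
  by_cases h : mode = "minor" <;> simp [h]

-- the finite core: every clipped note, every root residue, both effective scales
set_option maxHeartbeats 8000000 in
set_option maxRecDepth 8192 in
lemma pvCore :
    ∀ r ∈ PySem.List.pyRange 0 12 1, ∀ b : Bool, ∀ c ∈ PySem.List.pyRange 0 128 1,
      pvFA c r b = pvGB c ((PySem.List.pyRange 0 128 1).filter (fun m => pvInScaleB m r b)) := by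
  decide

-- ===== VERDICT (by name: the statement is the Claim_ definition above) =====
theorem nearest_scale_note_py_spec : Claim_equal_nearest_scale_note_py := by
  intro note root mode _
  unfold Spec_nearest_scale_note_py
  rw [pvA_glue, pvB_glue]
  apply pvCore
  · rw [PySem.List.mem_pyRange_one]
    exact ⟨PySem.Int.mod_nonneg root (by norm_num), PySem.Int.mod_lt root (by norm_num)⟩
  · rw [PySem.List.mem_pyRange_one]; omega
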